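-- pv_equiv track=rewrite | github.com/Asukanakamuragg/SkillBox | Python Basics. Part 2/3.6Practicalwork/Task 9 Rollers.py | max_people
-- ===== SOURCE A (Python) =====
-- def max_people(rolelrs: list[int], feet_sizes: list[int]) -> int:
--     rolelrs.sort()
--     feet_sizes.sort()
--     roller_index = foot_index = 0
--     count = 0
--     while roller_index < len(rolelrs) and foot_index < len(feet_sizes):
--         if rolelrs[roller_index] == feet_sizes[foot_index]:
--             count += 1
--             roller_index += 1
--             foot_index += 1
--         elif rolelrs[roller_index] < feet_sizes[foot_index]:
--             roller_index += 1
--         else: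
--             foot_index += 1
--     return count
-- ===== SOURCE B (Python) =====
-- # Counting re-implementation: build per-value count dictionaries and sum the
-- # minimum count per shared size, instead of A's two-pointer merge scan.
-- # Like A, it sorts both lists in place (callers can observe that mutation);
-- # the return value does not depend on the sort.
-- def max_people(rolelrs: list[int], feet_sizes: list[int]) -> int:
--     rolelrs.sort()
--     feet_sizes.sort()
--     roller_counts = {}
--     for v in rolelrs:
--         roller_counts[v] = roller_counts.get(v, 0) + 1
--     feet_counts = {}
--     for v in feet_sizes:
--         feet_counts[v] = feet_counts.get(v, 0) + 1
--     total = 0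
--     for v, c in roller_counts.items():
--         total += min(c, feet_counts.get(v, 0))
--     return total
-- ===== Notes on version B (the rewrite author's own statement) =====
-- stated objective: alternative
-- what changed: Replaces the two-pointer merge scan over the two sorted lists by per-value count dictionaries summed with min(count_a, count_b) per roller size; the in-place sorts are kept to preserve A's observable mutation.
import Mathlib
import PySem

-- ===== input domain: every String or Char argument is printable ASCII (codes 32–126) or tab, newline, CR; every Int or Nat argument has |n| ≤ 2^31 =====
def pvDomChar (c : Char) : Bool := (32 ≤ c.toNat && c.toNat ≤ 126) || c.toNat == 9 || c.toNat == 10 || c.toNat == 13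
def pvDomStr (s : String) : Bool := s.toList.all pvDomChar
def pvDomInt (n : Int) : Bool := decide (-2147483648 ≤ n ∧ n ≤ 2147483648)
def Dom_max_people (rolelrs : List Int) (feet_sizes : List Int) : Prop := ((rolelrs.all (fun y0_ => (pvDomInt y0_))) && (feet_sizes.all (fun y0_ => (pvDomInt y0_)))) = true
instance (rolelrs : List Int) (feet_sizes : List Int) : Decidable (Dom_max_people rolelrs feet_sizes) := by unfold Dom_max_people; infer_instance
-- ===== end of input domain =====

-- B replaces A's two-pointer merge over the sorted lists by per-value count
-- dictionaries summed with min per roller size (an alternative of the same cost).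
-- Both Pythons sort the argument lists in place; the equivalence proved here is
-- about the RETURN value only (B performs the same mutation).

-- ===== PORT A =====
-- A's while loop: two index cursors into the sorted lists and a running count.
-- 'fuel' only makes the recursion structural; max_people passes enough for the
-- loop to run to its Python guard (each iteration advances i or j).
def maxPeopleLoop (xs ys : List Int) : Nat → Nat → Int → Nat → Int
  | _, _, count, 0 => count
  | i, j, count, fuel + 1 =>
    if h : i < xs.length ∧ j < ys.length then
      if xs[i] = ys[j] then maxPeopleLoop xs ys (i + 1) (j + 1) (count + 1) fuel
      else if xs[i] < ys[j] then maxPeopleLoop xs ys (i + 1) j count fuel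
      else maxPeopleLoop xs ys i (j + 1) count fuel
    else count

def max_people (rolelrs : List Int) (feet_sizes : List Int) : Int :=
  maxPeopleLoop (PySem.List.sorted rolelrs (fun x => x) false)
    (PySem.List.sorted feet_sizes (fun x => x) false) 0 0 0
    (rolelrs.length + feet_sizes.length)

-- ===== PORT B =====
def max_people_alt (rolelrs : List Int) (feet_sizes : List Int) : Int :=
  let rs := PySem.List.sorted rolelrs (fun x => x) false
  let fs := PySem.List.sorted feet_sizes (fun x => x) false
  let rollerCounts := rs.foldl (fun d v => d.insert v (d.getD v 0 + 1)) PySem.Dict.empty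
  let feetCounts := fs.foldl (fun d v => d.insert v (d.getD v 0 + 1)) PySem.Dict.empty
  rollerCounts.items.foldl (fun total p => total + min p.2 (feetCounts.getD p.1 0)) 0

-- ===== PRECONDITION & SPEC =====
def Spec_max_people (rolelrs : List Int) (feet_sizes : List Int) (out : Int) : Prop := out = max_people_alt rolelrs feet_sizes
instance (rolelrs : List Int) (feet_sizes : List Int) (out : Int) : Decidable (Spec_max_people rolelrs feet_sizes out) := by unfold Spec_max_people; infer_instance

-- ===== CLAIM (what is proved, stated in full; the proofs are below) =====
def Claim_equal_max_people : Prop := ∀ (rolelrs : List Int) (feet_sizes : List Int), Dom_max_people rolelrs feet_sizes → Spec_max_people rolelrs feet_sizes (max_people rolelrs feet_sizes)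

-- ===== LEMMAS AND PROOFS =====

-- A's loop, given enough fuel for its guard and sorted lists, counts the
-- multiset intersection of the two remaining suffixes
lemma maxPeopleLoop_eq_inter_card (xs ys : List Int)
    (hx : xs.Pairwise (· ≤ ·)) (hy : ys.Pairwise (· ≤ ·)) :
    ∀ (fuel i j : Nat) (c : Int),
      (xs.length - i) + (ys.length - j) ≤ fuel →
      maxPeopleLoop xs ys i j c fuel
        = c + (((xs.drop i : List Int) : Multiset Int) ∩ ((ys.drop j : List Int) : Multiset Int)).card := by
  intro fuel
  induction fuel with
  | zero =>
    intro i j c hfuel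
    have hi : xs.length ≤ i := by omega
    have hj : ys.length ≤ j := by omega
    rw [maxPeopleLoop, List.drop_eq_nil_of_le hi, List.drop_eq_nil_of_le hj]
    simp
  | succ fuel ih =>
    intro i j c hfuel
    rw [maxPeopleLoop]
    split_ifs with h heq hlt
    · -- equal heads: both cursors advance, count grows
      rw [ih (i + 1) (j + 1) (c + 1) (by omega),
        List.drop_eq_getElem_cons h.1, List.drop_eq_getElem_cons h.2, heq]
      have hM : ((ys[j] :: xs.drop (i + 1) : List Int) : Multiset Int)
            ∩ ((ys[j] :: ys.drop (j + 1) : List Int) : Multiset Int)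
          = ys[j] ::ₘ (((xs.drop (i + 1) : List Int) : Multiset Int)
              ∩ ((ys.drop (j + 1) : List Int) : Multiset Int)) := by
        rw [← Multiset.cons_coe, ← Multiset.cons_coe,
          Multiset.cons_inter_of_pos _ (Multiset.mem_cons_self _ _),
          Multiset.erase_cons_head]
      rw [hM, Multiset.card_cons]
      push_cast; ring
    · -- xs[i] < ys[j]: xs[i] matches nothing remaining in ys
      rw [ih (i + 1) j c (by omega), List.drop_eq_getElem_cons h.1]
      have hnotmem : xs[i] ∉ ((ys.drop j : List Int) : Multiset Int) := by
        rw [Multiset.mem_coe, List.drop_eq_getElem_cons h.2]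
        intro hmem0
        rcases List.mem_cons.mp hmem0 with h1 | hmem
        · omega
        · have hd : (ys[j] :: ys.drop (j + 1)).Pairwise (· ≤ ·) :=
            List.drop_eq_getElem_cons h.2 ▸ hy.drop (i := j)
          have := List.rel_of_pairwise_cons hd hmem
          omega
      rw [← Multiset.cons_coe, Multiset.cons_inter_of_neg _ hnotmem]
    · -- ys[j] < xs[i]: ys[j] matches nothing remaining in xs
      rw [ih i (j + 1) c (by omega), List.drop_eq_getElem_cons h.2, ← Multiset.cons_coe]
      have hnotmem : ys[j] ∉ ((xs.drop i : List Int) : Multiset Int) := by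
        rw [Multiset.mem_coe, List.drop_eq_getElem_cons h.1]
        intro hmem0
        rcases List.mem_cons.mp hmem0 with h1 | hmem
        · omega
        · have hd : (xs[i] :: xs.drop (i + 1)).Pairwise (· ≤ ·) :=
            List.drop_eq_getElem_cons h.1 ▸ hx.drop (i := i)
          have := List.rel_of_pairwise_cons hd hmem
          omega
      have hM : ((xs.drop i : List Int) : Multiset Int)
            ∩ (ys[j] ::ₘ ((ys.drop (j + 1) : List Int) : Multiset Int))
          = ((xs.drop i : List Int) : Multiset Int)
            ∩ ((ys.drop (j + 1) : List Int) : Multiset Int) := by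
        rw [Multiset.inter_comm, Multiset.cons_inter_of_neg _ hnotmem]
        exact Multiset.inter_comm _ _
      rw [hM]
    · -- guard false: one suffix is empty, nothing more matches
      rcases Nat.lt_or_ge i xs.length with hi | hi
      · have hj : ys.length ≤ j := by omega
        rw [List.drop_eq_nil_of_le hj]
        simp
      · rw [List.drop_eq_nil_of_le hi]
        simp

-- B's min-of-counts sum over the distinct values is the multiset intersection card
lemma sum_min_counts_eq_inter_card (xs ys : List Int) :
    ((PySem.Set.ofList xs).map
      (fun v => min ((xs.count v : Int)) ((ys.count v : Int)))).sum
    = (((xs : Multiset Int) ∩ (ys : Multiset Int)).card : Int) := by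
  have hnd : (PySem.Set.ofList xs).Nodup := PySem.Set.nodup_ofList xs
  have hfin : (PySem.Set.ofList xs).toFinset = xs.toFinset := by
    ext v
    simp [PySem.Set.mem_ofList]
  rw [← List.sum_toFinset _ hnd, hfin]
  have hcast : ∀ v ∈ xs.toFinset, min ((xs.count v : Int)) ((ys.count v : Int))
      = ((min (xs.count v) (ys.count v) : Nat) : Int) := by
    intro v _
    simp [Nat.cast_min]
  rw [Finset.sum_congr rfl hcast, ← Nat.cast_sum]
  congr 1
  have hsub : ((xs : Multiset Int) ∩ (ys : Multiset Int)).toFinset ⊆ xs.toFinset := by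
    intro v hv
    simp only [Multiset.mem_toFinset, Multiset.mem_inter, Multiset.mem_coe] at hv
    simpa [List.mem_toFinset] using hv.1
  calc xs.toFinset.sum (fun v => min (xs.count v) (ys.count v))
      = xs.toFinset.sum (fun v => ((xs : Multiset Int) ∩ (ys : Multiset Int)).count v) := by
        refine Finset.sum_congr rfl (fun v _ => ?_)
        simp
    _ = (((xs : Multiset Int) ∩ (ys : Multiset Int)).toFinset).sum
          (fun v => ((xs : Multiset Int) ∩ (ys : Multiset Int)).count v) := by
        refine (Finset.sum_subset hsub (fun v _ hnot => ?_)).symm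
        exact Multiset.count_eq_zero.mpr (by simpa [Multiset.mem_toFinset] using hnot)
    _ = ((xs : Multiset Int) ∩ (ys : Multiset Int)).card :=
        Multiset.toFinset_sum_count_eq _

-- unfolding B to the min-of-counts sum over its sorted lists
lemma max_people_alt_eq_sum (rolelrs feet_sizes : List Int) :
    max_people_alt rolelrs feet_sizes
    = ((PySem.Set.ofList (PySem.List.sorted rolelrs (fun x => x) false)).map
        (fun v => min (((PySem.List.sorted rolelrs (fun x => x) false).count v : Int))
          (((PySem.List.sorted feet_sizes (fun x => x) false).count v : Int)))).sum := by
  unfold max_people_alt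
  dsimp only
  rw [PySem.Dict.foldl_insert_getD_add_one_eq_counter,
    PySem.Dict.foldl_insert_getD_add_one_eq_counter,
    PySem.List.foldl_add (g := fun p : Int × Int =>
      min p.2 ((PySem.Dict.counter (PySem.List.sorted feet_sizes (fun x => x) false)).getD p.1 0)),
    PySem.Dict.items_counter, List.map_map]
  simp [Function.comp_def, PySem.Dict.getD_counter]

theorem max_people_spec_aux (rolelrs feet_sizes : List Int) :
    max_people rolelrs feet_sizes = max_people_alt rolelrs feet_sizes := by
  have hx := PySem.List.sorted_pairwise rolelrs (fun x => x)
  have hy := PySem.List.sorted_pairwise feet_sizes (fun x => x)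
  have hlen1 : (PySem.List.sorted rolelrs (fun x => x) false).length = rolelrs.length :=
    PySem.List.length_sorted rolelrs (fun x => x) false
  have hlen2 : (PySem.List.sorted feet_sizes (fun x => x) false).length = feet_sizes.length :=
    PySem.List.length_sorted feet_sizes (fun x => x) false
  rw [max_people, maxPeopleLoop_eq_inter_card _ _ hx hy _ 0 0 0 (by omega),
    List.drop_zero, List.drop_zero, max_people_alt_eq_sum,
    sum_min_counts_eq_inter_card]
  ring

-- ===== VERDICT (by name: the statement is the Claim_ definition above) =====
theorem max_people_spec : Claim_equal_max_people := by
  intro rolelrs feet_sizes _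
  exact max_people_spec_aux rolelrs feet_sizes
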